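-- pv_equiv track=rewrite | github.com/benquick123/code-profiling | code/batch-2/vse-naloge-brez-testov/DN6-M-131.py | prestej_tvite
-- ===== SOURCE A (Python) =====
-- def prestej_tvite(tviti):
--     pogostosti = {}
--     for tvit in tviti:
--         kljuc = tvit.split(":")[0]
--         if kljuc not in pogostosti:
--             pogostosti[kljuc] = 0
--     for tvit in tviti:
--         kljuc = tvit.split(":")[0]
--         pogostosti[kljuc] += 1
--     return pogostosti
-- ===== SOURCE B (Python) =====
-- def prestej_tvite(tviti):
--     pogostosti = {}
--     for tvit in tviti:
--         kljuc = tvit.split(":")[0]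
--         pogostosti[kljuc] = pogostosti.get(kljuc, 0) + 1
--     return pogostosti
-- ===== Notes on version B (the rewrite author's own statement) =====
-- stated objective: simpler
-- what changed: B discovers and counts each key in a single pass with dict.get(k, 0) + 1 instead of A's two separate passes (initialise all keys to 0, then increment).
import Mathlib
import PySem

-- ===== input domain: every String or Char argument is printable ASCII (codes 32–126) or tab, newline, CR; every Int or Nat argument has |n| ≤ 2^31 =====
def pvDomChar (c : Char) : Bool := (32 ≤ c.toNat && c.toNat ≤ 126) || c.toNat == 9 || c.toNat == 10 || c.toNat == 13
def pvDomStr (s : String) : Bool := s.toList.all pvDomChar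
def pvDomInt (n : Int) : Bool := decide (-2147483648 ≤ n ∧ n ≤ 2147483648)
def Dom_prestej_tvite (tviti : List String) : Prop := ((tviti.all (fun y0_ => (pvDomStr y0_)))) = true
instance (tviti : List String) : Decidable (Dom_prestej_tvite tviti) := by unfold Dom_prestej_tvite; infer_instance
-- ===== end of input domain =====

-- B discovers and counts each key in ONE pass with get(k, 0) + 1 instead of A's two
-- passes (initialise every key to 0, then increment); return value only, no mutation.

-- tvit.split(":")[0] : split with a nonempty separator never returns none nor an empty
-- list, so the .getD []/.headD "" defaults are never used and the [0] index is exact.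
def pvKey (tvit : String) : String := ((PySem.Str.split? tvit ":").getD []).headD ""

-- ===== PORT A =====
def prestej_tvite (tviti : List String) : List (String × Int) :=
  -- first loop: initialise each unseen key to 0
  -- second loop: pogostosti[kljuc] += 1 (the key is always present after the first loop)
  (tviti.foldl (fun d tvit => d.modify (pvKey tvit) 0 (· + 1))
    (tviti.foldl (fun d tvit =>
      if d.contains (pvKey tvit) then d else d.insert (pvKey tvit) 0)
      PySem.Dict.empty)).items

-- ===== PORT B =====
def prestej_tvite_alt (tviti : List String) : List (String × Int) :=
  (tviti.foldl (fun d tvit =>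
    d.insert (pvKey tvit) (d.getD (pvKey tvit) 0 + 1)) PySem.Dict.empty).items

-- ===== PRECONDITION & SPEC =====
def Spec_prestej_tvite (tviti : List String) (out : List (String × Int)) : Prop := out = prestej_tvite_alt tviti
instance (tviti : List String) (out : List (String × Int)) : Decidable (Spec_prestej_tvite tviti out) := by unfold Spec_prestej_tvite; infer_instance

-- ===== CLAIM (what is proved, stated in full; the proofs are below) =====
def Claim_equal_prestej_tvite : Prop := ∀ (tviti : List String), Dom_prestej_tvite tviti → Spec_prestej_tvite tviti (prestej_tvite tviti)

-- ===== LEMMAS AND PROOFS =====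

-- A's first loop over the key list L, started from a dict whose items map each key of a
-- Nodup list s to 0, produces the dict whose items map Set.update s L to 0.
theorem pv_init_loop (L : List String) (s : List String) (hs : s.Nodup) :
    L.foldl (fun d k => if d.contains k then d else d.insert k 0)
      (PySem.Dict.mk (s.map (fun k => (k, (0 : Int))))) =
    PySem.Dict.mk ((PySem.Set.update s L).map (fun k => (k, (0 : Int)))) := by
  induction L generalizing s with
  | nil => simp [PySem.Set.update]
  | cons k L ih =>
    simp only [List.foldl_cons]
    by_cases hk : k ∈ s
    · have hc : (PySem.Dict.mk (s.map (fun k => (k, (0 : Int))))).contains k = true := by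
        rw [PySem.Dict.contains_mk]
        exact List.any_eq_true.mpr ⟨(k, 0), List.mem_map.mpr ⟨k, hk, rfl⟩, by simp⟩
      rw [if_pos hc, ih s hs, PySem.Set.update_cons, PySem.Set.add_of_mem hk]
    · have hc : (PySem.Dict.mk (s.map (fun k => (k, (0 : Int))))).contains k = false := by
        rw [PySem.Dict.contains_mk]
        simp only [List.any_eq_false]
        rintro ⟨a, b⟩ hab
        obtain ⟨a', ha', he⟩ := List.mem_map.mp hab
        cases he
        exact fun h => hk ((beq_iff_eq.mp h) ▸ ha')
      rw [if_neg (by simp [hc])]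
      have hins : (PySem.Dict.mk (s.map (fun k => (k, (0 : Int))))).insert k 0 =
          PySem.Dict.mk ((s ++ [k]).map (fun k => (k, (0 : Int)))) := by
        apply PySem.Dict.ext
        rw [PySem.Dict.items_insert_of_not_contains _ _ hc]
        simp
      rw [hins, ih (s ++ [k]) (by simp [List.nodup_append, hs]; exact fun a ha hak => hk (hak ▸ ha)),
        PySem.Set.update_cons, PySem.Set.add_of_not_mem hk]

theorem pv_update_self (L : List String) :
    PySem.Set.update (PySem.Set.ofList L) L = PySem.Set.ofList L := by
  rw [PySem.Set.update_eq_append_filter]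
  have : (PySem.Set.ofList L).filter (fun y => !(PySem.Set.contains (PySem.Set.ofList L) y)) = [] := by
    apply List.filter_eq_nil_iff.mpr
    intro a ha
    simp [PySem.Set.contains, ha]
  rw [this, List.append_nil]

-- ===== VERDICT (by name: the statement is the Claim_ definition above) =====
theorem prestej_tvite_spec : Claim_equal_prestej_tvite := by
  intro tviti _
  unfold Spec_prestej_tvite prestej_tvite prestej_tvite_alt
  set L := tviti.map pvKey with hL
  -- B's single loop is collections-Counter of L
  have hB : (tviti.foldl (fun d tvit => d.insert (pvKey tvit) (d.getD (pvKey tvit) 0 + 1)) PySem.Dict.empty) = PySem.Dict.counter L := by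
    have e := List.foldl_map (f := pvKey)
      (g := fun (d : PySem.Dict String Int) k => d.insert k (d.getD k 0 + 1))
      (l := tviti) (init := PySem.Dict.empty)
    exact e.symm.trans (PySem.Dict.foldl_insert_getD_add_one_eq_counter L)
  -- A's first loop: every key of L mapped to 0, in first-appearance order
  have hA1 : (tviti.foldl (fun d tvit => if d.contains (pvKey tvit) then d else d.insert (pvKey tvit) 0) PySem.Dict.empty) =
      PySem.Dict.mk ((PySem.Set.ofList L).map (fun k => (k, (0 : Int)))) := by
    have e := List.foldl_map (f := pvKey)
      (g := fun (d : PySem.Dict String Int) k => if d.contains k then d else d.insert k 0)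
      (l := tviti) (init := PySem.Dict.empty)
    refine e.symm.trans ?_
    have := pv_init_loop (tviti.map pvKey) [] (by simp)
    simpa [PySem.Dict.empty, PySem.Set.update_nil_left] using this
  set d1 := PySem.Dict.mk ((PySem.Set.ofList L).map (fun k => (k, (0 : Int)))) with hd1
  have hkeys1 : d1.keys = PySem.Set.ofList L := by
    simp [hd1, PySem.Dict.keys, List.map_map, Function.comp_def]
  have hnd1 : d1.keys.Nodup := by
    rw [hkeys1]; exact PySem.Set.nodup_ofList L
  set d2 := tviti.foldl (fun d tvit => d.modify (pvKey tvit) 0 (· + 1)) d1 with hd2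
  have hd2' : d2 = L.foldl (fun d k => d.modify k 0 (· + 1)) d1 := by
    rw [hd2]
    exact (List.foldl_map (f := pvKey)
      (g := fun (d : PySem.Dict String Int) k => d.modify k 0 (· + 1))
      (l := tviti) (init := d1)).symm
  have hnd2 : d2.keys.Nodup := by
    rw [hd2']
    exact PySem.Dict.nodup_keys_foldl_modify_key L id 0 (fun _ _ => (· + 1)) d1 hnd1
  have hk2 : d2.keys = PySem.Set.ofList L := by
    rw [hd2', PySem.Dict.keys_foldl_modify L 0 (fun _ _ => (· + 1)) d1, hkeys1, pv_update_self]
  -- values of A's second loop: the count of the key in L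
  have hv : ∀ k ∈ PySem.Set.ofList L, d2.getD k 0 = (L.count k : Int) := by
    intro k hk
    rw [hd2', PySem.Dict.getD_foldl_modify_add_one]
    have h0 : d1.getD k 0 = 0 := by
      refine PySem.Dict.getD_of_mem_items d1 ?_ hnd1 0
      rw [hd1]
      exact List.mem_map.mpr ⟨k, hk, rfl⟩
    rw [h0]; ring
  -- compare the items lists
  rw [hA1, ← hd2, hB]
  rw [PySem.Dict.items_eq_map_keys d2 hnd2 0, hk2, PySem.Dict.items_counter]
  exact List.map_congr_left (fun k hk => by rw [hv k hk])
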